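-- pv_equiv track=rewrite | github.com/alzbetasrutkova/AiB_projects | Project6/approx_fold.py | find_score_and_pairs
-- ===== SOURCE A (Python) =====
-- def find_score_and_pairs(seq_odd_even, evens_left = True):
--     score = 0
--     pairs = list()
--     j = len(seq_odd_even) - 1
--     i = 0
--
--     if evens_left:
--         while i < j:
--             if seq_odd_even[i] == "e":
--                 while j > i:
--                     if seq_odd_even[j] == "o":
--                         score = score + 1
--                         pairs.append([i, j])
--                         j = j-1
--                         break
--                     j = j-1
--             i = i + 1
--     else:
--         while i < j:
--             if seq_odd_even[i] == "o":
--                 while j > i: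
--                     if seq_odd_even[j] == "e":
--                         score = score + 1
--                         pairs.append([i, j])
--                         j = j-1
--                         break
--                     j = j-1
--             i = i + 1
--     return score, pairs
-- ===== SOURCE B (Python) =====
-- def find_score_and_pairs(seq_odd_even, evens_left=True):
--     left_c, right_c = ("e", "o") if evens_left else ("o", "e")
--     lefts = [k for k, c in enumerate(seq_odd_even) if c == left_c]
--     rights = [k for k, c in enumerate(seq_odd_even) if c == right_c]
--     rights.reverse()
--     pairs = []
--     for a, b in zip(lefts, rights):
--         if a >= b:
--             break
--         pairs.append([a, b])
--     return len(pairs), pairs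
-- ===== Notes on version B (the rewrite author's own statement) =====
-- stated objective: simpler
-- what changed: Replaces A's nested while loops with shared mutable i/j pointers by building the two position index lists once (ascending left-char positions, descending right-char positions) and zipping them, cutting at the first crossing; the score is just len(pairs).
import Mathlib
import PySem

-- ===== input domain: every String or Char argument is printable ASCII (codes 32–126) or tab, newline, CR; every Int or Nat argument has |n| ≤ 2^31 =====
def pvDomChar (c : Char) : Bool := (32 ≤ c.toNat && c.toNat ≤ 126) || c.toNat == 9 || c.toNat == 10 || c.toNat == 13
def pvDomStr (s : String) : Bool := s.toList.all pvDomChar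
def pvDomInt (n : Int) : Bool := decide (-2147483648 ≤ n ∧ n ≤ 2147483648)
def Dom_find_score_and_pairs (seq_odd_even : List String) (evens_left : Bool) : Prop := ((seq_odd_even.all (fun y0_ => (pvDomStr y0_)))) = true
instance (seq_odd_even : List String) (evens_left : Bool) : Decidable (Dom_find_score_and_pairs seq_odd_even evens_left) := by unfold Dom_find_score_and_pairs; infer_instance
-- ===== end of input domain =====

-- B builds the two position index lists once and zips them, cutting at the first crossing,
-- instead of A's nested while loops over shared i/j pointers; return values proved equal on all inputs.


-- ===== PORT A =====
-- inner `while j > i:` loop of A, scanning j downwards for value c at an index > i;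
-- returns the updated (score, pairs, j).  The while loop is encoded structurally with a
-- fuel counter equal to the loop measure (j - i).toNat, so it computes by `decide`/`rfl`;
-- pyInner_eq below shows it satisfies exactly the loop's one-step unfolding.
-- The index j is in range whenever the read actually happens from the entry point
-- (0 ≤ i < j ≤ len-1), so `.getD ""` is exact there.
def pyInnerGo (seq : List String) (c : String) (i score : Int)
    (pairs : List (List Int)) : Nat → Int → Int × List (List Int) × Int
  | 0, j => (score, pairs, j)
  | fuel + 1, j =>
    if i < j then
      if (PySem.List.pyGet? seq j).getD "" == c then
        (score + 1, pairs ++ [[i, j]], j - 1)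
      else pyInnerGo seq c i score pairs fuel (j - 1)
    else (score, pairs, j)

def pyInner (seq : List String) (c : String) (i score : Int)
    (pairs : List (List Int)) (j : Int) : Int × List (List Int) × Int :=
  pyInnerGo seq c i score pairs (j - i).toNat j





-- outer `while i < j:` loop of A; cl is the char sought left-to-right, cr right-to-left;
-- again fuel = the loop measure (j - i).toNat, pyOuter_eq is the loop's unfolding.
def pyOuterGo (seq : List String) (cl cr : String) :
    Nat → Int → Int → Int → List (List Int) → Int × List (List Int)
  | 0, _, _, score, pairs => (score, pairs)
  | fuel + 1, i, j, score, pairs =>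
    if i < j then
      if (PySem.List.pyGet? seq i).getD "" == cl then
        let r := pyInner seq cr i score pairs j
        pyOuterGo seq cl cr fuel (i + 1) r.2.2 r.1 r.2.1
      else pyOuterGo seq cl cr fuel (i + 1) j score pairs
    else (score, pairs)

def pyOuter (seq : List String) (cl cr : String) (i j score : Int)
    (pairs : List (List Int)) : Int × List (List Int) :=
  pyOuterGo seq cl cr (j - i).toNat i j score pairs



def find_score_and_pairs (seq_odd_even : List String) (evens_left : Bool) : Int × List (List Int) :=
  if evens_left then
    pyOuter seq_odd_even "e" "o" 0 ((seq_odd_even.length : Int) - 1) 0 []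
  else
    pyOuter seq_odd_even "o" "e" 0 ((seq_odd_even.length : Int) - 1) 0 []

-- ===== PORT B =====
-- positions (as Python indices) of the entries equal to c
def posOf (seq : List String) (c : String) : List Int :=
  (PySem.List.enumerate seq).filterMap (fun p => if p.2 == c then some p.1 else none)

-- Source B's `for a, b in zip(...): if a >= b: break; pairs.append([a, b])`
def takeCross : List (Int × Int) → List (List Int)
  | [] => []
  | (a, b) :: t => if a ≥ b then [] else [a, b] :: takeCross t

def find_score_and_pairs_alt (seq_odd_even : List String) (evens_left : Bool) : Int × List (List Int) :=
  let cs := if evens_left then ("e", "o") else ("o", "e")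
  let lefts := posOf seq_odd_even cs.1
  let rights := (posOf seq_odd_even cs.2).reverse
  let pairs := takeCross (lefts.zip rights)
  ((pairs.length : Int), pairs)

-- ===== PRECONDITION & SPEC =====
def Spec_find_score_and_pairs (seq_odd_even : List String) (evens_left : Bool) (out : Int × List (List Int)) : Prop := out = find_score_and_pairs_alt seq_odd_even evens_left
instance (seq_odd_even : List String) (evens_left : Bool) (out : Int × List (List Int)) : Decidable (Spec_find_score_and_pairs seq_odd_even evens_left out) := by unfold Spec_find_score_and_pairs; infer_instance

-- ===== CLAIM (what is proved, stated in full; the proofs are below) =====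
def Claim_equal_find_score_and_pairs : Prop := ∀ (seq_odd_even : List String) (evens_left : Bool), Dom_find_score_and_pairs seq_odd_even evens_left → Spec_find_score_and_pairs seq_odd_even evens_left (find_score_and_pairs seq_odd_even evens_left)

-- ===== LEMMAS AND PROOFS =====

-- the inner loop never moves j upward
theorem pyInnerGo_j_le (seq : List String) (c : String) (i score : Int)
    (pairs : List (List Int)) (fuel : Nat) (j : Int) :
    (pyInnerGo seq c i score pairs fuel j).2.2 ≤ j := by
  induction fuel generalizing j with
  | zero => simp [pyInnerGo]
  | succ f ih =>
    rw [pyInnerGo]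
    split
    · split
      · show j - 1 ≤ j
        omega
      · have := ih (j - 1); omega
    · simp

theorem pyInner_j_le (seq : List String) (c : String) (i score : Int)
    (pairs : List (List Int)) (j : Int) :
    (pyInner seq c i score pairs j).2.2 ≤ j :=
  pyInnerGo_j_le seq c i score pairs _ j

-- pyInner is exactly the one-step unfolding of A's inner while loop
theorem pyInner_eq (seq : List String) (c : String) (i score : Int)
    (pairs : List (List Int)) (j : Int) :
    pyInner seq c i score pairs j =
      if i < j then
        if (PySem.List.pyGet? seq j).getD "" == c then
          (score + 1, pairs ++ [[i, j]], j - 1)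
        else pyInner seq c i score pairs (j - 1)
      else (score, pairs, j) := by
  unfold pyInner
  by_cases h : i < j
  · have hf : (j - i).toNat = (j - 1 - i).toNat + 1 := by omega
    rw [hf, pyInnerGo, if_pos h]
  · rcases hn : (j - i).toNat with _ | k
    · rw [pyInnerGo, if_neg h]
    · rw [pyInnerGo, if_neg h, if_neg h]

-- the result does not depend on the fuel, as long as it covers the loop measure
theorem pyOuterGo_congr (seq : List String) (cl cr : String) (f1 f2 : Nat)
    (i j score : Int) (pairs : List (List Int))
    (h1 : (j - i).toNat ≤ f1) (h2 : (j - i).toNat ≤ f2) :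
    pyOuterGo seq cl cr f1 i j score pairs = pyOuterGo seq cl cr f2 i j score pairs := by
  induction f1 generalizing f2 i j score pairs with
  | zero =>
    rcases f2 with _ | k
    · rfl
    · rw [pyOuterGo, pyOuterGo, if_neg (by omega)]
  | succ f ih =>
    rcases f2 with _ | k
    · rw [pyOuterGo, pyOuterGo, if_neg (by omega)]
    · rw [pyOuterGo]
      conv_rhs => rw [pyOuterGo]
      split
      · split
        · have hj := pyInner_j_le seq cr i score pairs j
          exact ih k (i + 1) _ _ _ (by omega) (by omega)
        · exact ih k (i + 1) j score pairs (by omega) (by omega)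
      · rfl

-- pyOuter is exactly the one-step unfolding of A's outer while loop
theorem pyOuter_eq (seq : List String) (cl cr : String) (i j score : Int)
    (pairs : List (List Int)) :
    pyOuter seq cl cr i j score pairs =
      if i < j then
        if (PySem.List.pyGet? seq i).getD "" == cl then
          let r := pyInner seq cr i score pairs j
          pyOuter seq cl cr (i + 1) r.2.2 r.1 r.2.1
        else pyOuter seq cl cr (i + 1) j score pairs
      else (score, pairs) := by
  unfold pyOuter
  by_cases h : i < j
  · have hf : (j - i).toNat = (j - 1 - i).toNat + 1 := by omega
    rw [hf, pyOuterGo, if_pos h, if_pos h]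
    split
    · have hj := pyInner_j_le seq cr i score pairs j
      exact pyOuterGo_congr seq cl cr _ _ _ _ _ _ (by omega) (by omega)
    · exact pyOuterGo_congr seq cl cr _ _ _ _ _ _ (by omega) (by omega)
  · rcases hn : (j - i).toNat with _ | k
    · rw [pyOuterGo, if_neg h]
    · rw [pyOuterGo, if_neg h, if_neg h]

-- ascending/descending position sublists the two loops of A walk through
def Efrom (seq : List String) (c : String) (i : Int) : List Int :=
  (posOf seq c).filter (fun k => decide (i ≤ k))

def Oto (seq : List String) (c : String) (j : Int) : List Int :=
  ((posOf seq c).reverse).filter (fun k => decide (k ≤ j))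

theorem mem_posOf (seq : List String) (c : String) (k : Int) :
    k ∈ posOf seq c ↔ ∃ n : Nat, n < seq.length ∧ k = (n : Int) ∧ seq[n]? = some c := by
  simp only [posOf, List.mem_filterMap, PySem.List.mem_enumerate_iff]
  constructor
  · rintro ⟨⟨a, b⟩, ⟨n, hn, hp⟩, hf⟩
    cases hp
    by_cases hb : seq[n] == c
    · refine ⟨n, hn, ?_, ?_⟩
      · simp [hb] at hf; omega
      · simp [List.getElem?_eq_getElem hn]; exact (beq_iff_eq.mp hb)
    · simp [hb] at hf
  · rintro ⟨n, hn, hk, hv⟩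
    refine ⟨((n:Int), seq[n]), ⟨n, hn, by simp⟩, ?_⟩
    rw [List.getElem?_eq_getElem hn] at hv
    simp_all

theorem posOf_pairwise (seq : List String) (c : String) :
    (posOf seq c).Pairwise (· < ·) := by
  refine List.Pairwise.filterMap _ ?_ (PySem.List.pairwise_lt_enumerate (xs := seq) (s := 0))
  intro a b hab x hx y hy
  
  split at hx <;> split at hy <;> simp_all

theorem posOf_rev_pairwise (seq : List String) (c : String) :
    ((posOf seq c).reverse).Pairwise (· > ·) :=
  List.pairwise_reverse.mpr (posOf_pairwise seq c)

theorem Oto_pairwise (seq : List String) (c : String) (j : Int) :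
    (Oto seq c j).Pairwise (· > ·) :=
  (posOf_rev_pairwise seq c).filter _

-- reading seq[i] (0 ≤ i) matches c ≠ "" exactly at the positions in posOf
theorem read_eq_iff (seq : List String) (c : String) (i : Int) (h0 : 0 ≤ i) (hc : c ≠ "") :
    ((PySem.List.pyGet? seq i).getD "" = c) ↔ i ∈ posOf seq c := by
  rw [mem_posOf, PySem.List.pyGet?_of_nonneg (xs := seq) (i := i) h0]
  by_cases h : i.toNat < seq.length
  · rw [List.getElem?_eq_getElem h]
    constructor
    · intro hv
      exact ⟨i.toNat, h, by omega, by rw [List.getElem?_eq_getElem h]; simp at hv; rw [hv]⟩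
    · rintro ⟨n, hn, rfl, hv⟩
      simp only [Int.toNat_natCast] at *
      rw [List.getElem?_eq_getElem hn] at hv
      simpa using hv
  · rw [List.getElem?_eq_none (by omega)]
    simp only [Option.getD_none]
    constructor
    · intro hv; exact absurd hv.symm hc
    · rintro ⟨n, hn, rfl, hv⟩; omega

theorem filter_ge_cons (l : List Int) (i : Int) (hl : l.Pairwise (· < ·)) (hi : i ∈ l) :
    l.filter (fun k => decide (i ≤ k)) = i :: l.filter (fun k => decide (i + 1 ≤ k)) := by
  induction l with
  | nil => cases hi
  | cons a t ih =>
    rcases List.pairwise_cons.mp hl with ⟨ha, ht⟩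
    rcases List.mem_cons.mp hi with h | h
    · subst h
      simp only [List.filter_cons, decide_eq_true_eq]
      rw [if_pos (le_refl i), if_neg (by omega)]
      congr 1
      exact List.filter_congr (fun x hx => by have := ha x hx; simp; omega)
    · have hai : a < i := ha i h
      simp only [List.filter_cons, decide_eq_true_eq]
      rw [if_neg (by omega), if_neg (by omega)]
      exact ih ht h

theorem filter_ge_not_mem (l : List Int) (i : Int) (hi : i ∉ l) :
    l.filter (fun k => decide (i ≤ k)) = l.filter (fun k => decide (i + 1 ≤ k)) :=
  List.filter_congr (fun x hx => by
    have : x ≠ i := fun h => hi (h ▸ hx)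
    simp; omega)

theorem filter_le_step (l : List Int) (hl : l.Pairwise (· > ·)) (j b : Int) (rest : List Int)
    (h : l.filter (fun k => decide (k ≤ j)) = b :: rest) :
    l.filter (fun k => decide (k ≤ b - 1)) = rest := by
  induction l with
  | nil => simp at h
  | cons a t ih =>
    rcases List.pairwise_cons.mp hl with ⟨ha, ht⟩
    by_cases haj : a ≤ j
    · simp only [List.filter_cons, decide_eq_true_eq, if_pos haj] at h
      obtain ⟨rfl, hrest⟩ : a = b ∧ t.filter (fun k => decide (k ≤ j)) = rest := by
        exact ⟨(List.cons.injEq _ _ _ _ ▸ h).1, (List.cons.injEq _ _ _ _ ▸ h).2⟩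
      have hall : t.filter (fun k => decide (k ≤ j)) = t :=
        List.filter_eq_self.mpr (fun x hx => by have := ha x hx; simp; omega)
      rw [List.filter_cons, if_neg (by simp), List.filter_eq_self.mpr
        (fun x hx => by have := ha x hx; simp; omega)]
      rw [hall] at hrest; exact hrest
    · simp only [List.filter_cons, decide_eq_true_eq, if_neg haj] at h
      have hb : b ∈ t.filter (fun k => decide (k ≤ j)) := h ▸ List.mem_cons_self
      have hbt : b ∈ t := (List.mem_filter.mp hb).1
      have : a > b := ha b hbt
      rw [List.filter_cons, if_neg (by simp; omega)]
      exact ih ht h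

-- members of Oto: in posOf and ≤ j
theorem mem_Oto (seq : List String) (c : String) (j k : Int) :
    k ∈ Oto seq c j ↔ k ∈ posOf seq c ∧ k ≤ j := by
  simp [Oto, List.mem_filter]

theorem mem_Efrom (seq : List String) (c : String) (i k : Int) :
    k ∈ Efrom seq c i ↔ k ∈ posOf seq c ∧ i ≤ k := by
  simp [Efrom, List.mem_filter]

theorem Oto_step_not_mem (seq : List String) (c : String) (j : Int) (hj : j ∉ posOf seq c) :
    Oto seq c (j - 1) = Oto seq c j := by
  refine List.filter_congr (fun x hx => ?_)
  have hxm : x ∈ posOf seq c := List.mem_reverse.mp hx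
  have : x ≠ j := fun h => hj (h ▸ hxm)
  simp; omega

theorem inner_found (seq : List String) (c : String) (i s : Int) (p : List (List Int))
    (j b : Int) (rest : List Int) (h0 : 0 ≤ i) (hc : c ≠ "")
    (hb : Oto seq c j = b :: rest) (hib : i < b) :
    pyInner seq c i s p j = (s + 1, p ++ [[i, b]], b - 1) := by
  have hbj : b ≤ j ∧ b ∈ posOf seq c := by
    have := (mem_Oto seq c j b).mp (hb ▸ List.mem_cons_self); exact ⟨this.2, this.1⟩
  have hij : i < j := lt_of_lt_of_le hib hbj.1
  rw [pyInner_eq, if_pos hij]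
  by_cases hr : (PySem.List.pyGet? seq j).getD "" = c
  · -- j is a c-position, so it is the max element of Oto j, i.e. b = j
    have hjm : j ∈ Oto seq c j := (mem_Oto seq c j j).mpr ⟨(read_eq_iff seq c j (by omega) hc).mp hr, le_refl j⟩
    have hpw : (b :: rest).Pairwise (· > ·) := hb ▸ Oto_pairwise seq c j
    have hjb : j ≤ b := by
      rcases List.mem_cons.mp (hb ▸ hjm : j ∈ b :: rest) with h | h
      · omega
      · have : b > j := List.rel_of_pairwise_cons hpw h
        omega
    have : b = j := le_antisymm hbj.1 hjb
    subst this
    rw [if_pos (beq_iff_eq.mpr hr)]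
  · rw [if_neg (by simpa using hr)]
    have hjn : j ∉ posOf seq c := fun hm => hr ((read_eq_iff seq c j (by omega) hc).mpr hm)
    exact inner_found seq c i s p (j - 1) b rest h0 hc (Oto_step_not_mem seq c j hjn ▸ hb) hib
termination_by (j - i).toNat
decreasing_by omega

theorem inner_none (seq : List String) (c : String) (i s : Int) (p : List (List Int))
    (j : Int) (h0 : 0 ≤ i) (hij : i ≤ j) (hc : c ≠ "")
    (hall : ∀ b ∈ Oto seq c j, b ≤ i) :
    pyInner seq c i s p j = (s, p, i) := by
  rw [pyInner_eq]
  by_cases h : i < j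
  · rw [if_pos h]
    have hjn : j ∉ posOf seq c := by
      intro hm
      have := hall j ((mem_Oto seq c j j).mpr ⟨hm, le_refl j⟩)
      omega
    rw [if_neg (by simpa using fun hr => hjn ((read_eq_iff seq c j (by omega) hc).mp hr))]
    exact inner_none seq c i s p (j - 1) h0 (by omega) hc
      (fun b hbm => hall b ((Oto_step_not_mem seq c j hjn) ▸ hbm))
  · rw [if_neg h]
    have : i = j := le_antisymm hij (by omega)
    rw [this]
termination_by (j - i).toNat
decreasing_by omega

theorem outer_main (seq : List String) (cl cr : String) (i j s : Int) (p : List (List Int))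
    (h0 : 0 ≤ i) (hcl : cl ≠ "") (hcr : cr ≠ "") :
    pyOuter seq cl cr i j s p =
      (s + ((takeCross ((Efrom seq cl i).zip (Oto seq cr j))).length : Int),
       p ++ takeCross ((Efrom seq cl i).zip (Oto seq cr j))) := by
  rw [pyOuter_eq]
  by_cases hij : i < j
  · rw [if_pos hij]
    by_cases hr : (PySem.List.pyGet? seq i).getD "" = cl
    · have him : i ∈ posOf seq cl := (read_eq_iff seq cl i h0 hcl).mp hr
      have hE : Efrom seq cl i = i :: Efrom seq cl (i + 1) :=
        filter_ge_cons _ i (posOf_pairwise seq cl) him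
      rw [if_pos (beq_iff_eq.mpr hr)]
      cases hO : Oto seq cr j with
      | nil =>
        have hin : pyInner seq cr i s p j = (s, p, i) :=
          inner_none seq cr i s p j h0 (le_of_lt hij) hcr (by simp [hO])
        simp only [hin]
        rw [pyOuter_eq, if_neg (by omega)]
        simp [hE, takeCross]
      | cons b rest =>
        by_cases hib : i < b
        · have hbj : b ≤ j :=
            ((mem_Oto seq cr j b).mp (hO ▸ List.mem_cons_self)).2
          have hin : pyInner seq cr i s p j = (s + 1, p ++ [[i, b]], b - 1) :=
            inner_found seq cr i s p j b rest h0 hcr hO hib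
          simp only [hin]
          rw [outer_main seq cl cr (i + 1) (b - 1) (s + 1) (p ++ [[i, b]]) (by omega) hcl hcr]
          have hO' : Oto seq cr (b - 1) = rest :=
            filter_le_step _ (posOf_rev_pairwise seq cr) j b rest hO
          rw [hE, hO']
          simp only [List.zip_cons_cons, takeCross, if_neg (by omega : ¬ i ≥ b)]
          refine Prod.ext ?_ ?_
          · simp; ring
          · simp
        · have hpw : (b :: rest).Pairwise (· > ·) := hO ▸ Oto_pairwise seq cr j
          have hall : ∀ x ∈ Oto seq cr j, x ≤ i := by
            intro x hx
            rcases List.mem_cons.mp (hO ▸ hx : x ∈ b :: rest) with h | h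
            · omega
            · have : b > x := List.rel_of_pairwise_cons hpw h
              omega
          have hin : pyInner seq cr i s p j = (s, p, i) :=
            inner_none seq cr i s p j h0 (le_of_lt hij) hcr hall
          simp only [hin]
          rw [pyOuter_eq, if_neg (by omega)]
          rw [hE]
          simp only [List.zip_cons_cons, takeCross, if_pos (by omega : i ≥ b)]
          simp
    · rw [if_neg (by simpa using hr)]
      rw [outer_main seq cl cr (i + 1) j s p (by omega) hcl hcr]
      have hnm : i ∉ posOf seq cl := fun hm => hr ((read_eq_iff seq cl i h0 hcl).mpr hm)
      rw [Efrom, Efrom, ← filter_ge_not_mem _ i hnm]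
  · rw [if_neg hij]
    have hnil : takeCross ((Efrom seq cl i).zip (Oto seq cr j)) = [] := by
      cases hE : Efrom seq cl i with
      | nil => simp [takeCross]
      | cons a t =>
        cases hO : Oto seq cr j with
        | nil => simp [takeCross]
        | cons b r =>
          have ha : i ≤ a := ((mem_Efrom seq cl i a).mp (hE ▸ List.mem_cons_self)).2
          have hb : b ≤ j := ((mem_Oto seq cr j b).mp (hO ▸ List.mem_cons_self)).2
          simp only [List.zip_cons_cons, takeCross, if_pos (by omega : a ≥ b)]
    simp [hnil]
termination_by (j - i).toNat
decreasing_by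
  · omega
  · omega

theorem Efrom_zero (seq : List String) (c : String) : Efrom seq c 0 = posOf seq c :=
  List.filter_eq_self.mpr (fun x hx => by
    obtain ⟨n, _, rfl, _⟩ := (mem_posOf seq c x).mp hx
    simp)

theorem Oto_top (seq : List String) (c : String) :
    Oto seq c ((seq.length : Int) - 1) = (posOf seq c).reverse :=
  List.filter_eq_self.mpr (fun x hx => by
    obtain ⟨n, hn, rfl, _⟩ := (mem_posOf seq c x).mp (List.mem_reverse.mp hx)
    simp; omega)

-- ===== VERDICT (by name: the statement is the Claim_ definition above) =====
theorem find_score_and_pairs_spec : Claim_equal_find_score_and_pairs := by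
  intro seq el _
  unfold Spec_find_score_and_pairs find_score_and_pairs find_score_and_pairs_alt
  cases el <;>
    simp only [if_true, if_false, Bool.false_eq_true] <;>
    rw [outer_main seq _ _ 0 _ 0 [] (le_refl 0) (by decide) (by decide),
        Efrom_zero, Oto_top] <;> simp
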